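-- pv_equiv track=rewrite | github.com/agarwalpratik/adventofcode2025 | day9/day92.py | build_allowed_intervals_per_row
-- ===== SOURCE A (Python) =====
-- def merge_sorted_xs(xs):
--     """xs: sorted list of ints. Return list of (start,end) inclusive merged runs."""
--     if not xs:
--         return []
--     runs = []
--     s = xs[0]
--     e = xs[0]
--     for x in xs[1:]:
--         if x == e + 1:
--             e = x
--         else:
--             runs.append((s,e))
--             s = x
--             e = x
--     runs.append((s,e))
--     return runs
--
-- def build_allowed_intervals_per_row(boundary_set, bbox):
--     min_x, max_x, min_y, max_y = bbox
--     intervals_by_row = {}  # y -> list of (start,end) inclusive, merged, sorted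
--
--     # Pre-group boundary x positions by row
--     boundary_by_row = {}
--     for x,y in boundary_set:
--         if y < min_y or y > max_y:
--             continue
--         boundary_by_row.setdefault(y, []).append(x)
--
--     # For each row in bbox, compute allowed intervals
--     for y in range(min_y, max_y+1):
--         xs = boundary_by_row.get(y)
--         if not xs:
--             # no boundary on this row -> either fully outside or fully interior.
--             # But for a simple closed orthogonal polygon this is rare; skip (no allowed)
--             intervals_by_row[y] = []
--             continue
--         xs.sort()
--         runs = merge_sorted_xs(xs)  # boundary runs
--         allowed = []
--         # include boundary runs themselves
--         for r in runs:
--             allowed.append(r)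
--         # interior runs are between runs[0] and runs[1], runs[2] and runs[3], ...
--         # i.e., between run[i].end+1 .. run[i+1].start-1 for i = 0,2,4,...
--         for i in range(0, len(runs)-1, 2):
--             left_end = runs[i][1]
--             right_start = runs[i+1][0]
--             if left_end + 1 <= right_start - 1:
--                 allowed.append((left_end+1, right_start-1))
--         # merge allowed intervals (they may overlap or touch)
--         if not allowed:
--             intervals_by_row[y] = []
--             continue
--         allowed.sort()
--         merged = []
--         s,e = allowed[0]
--         for a,b in allowed[1:]:
--             if a <= e + 1:
--                 e = max(e,b)
--             else:
--                 merged.append((s,e))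
--                 s,e = a,b
--         merged.append((s,e))
--         intervals_by_row[y] = merged
--     return intervals_by_row
-- ===== SOURCE B (Python) =====
-- def merge_sorted_xs(xs):
--     """xs: sorted list of ints. Return list of (start,end) inclusive merged runs."""
--     if not xs:
--         return []
--     runs = []
--     s = xs[0]
--     e = xs[0]
--     for x in xs[1:]:
--         if x == e + 1:
--             e = x
--         else:
--             runs.append((s,e))
--             s = x
--             e = x
--     runs.append((s,e))
--     return runs
--
-- def build_allowed_intervals_per_row(boundary_set, bbox):
--     min_x, max_x, min_y, max_y = bbox
--     by_row = {}
--     for x, y in boundary_set: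
--         if min_y <= y <= max_y:
--             by_row.setdefault(y, []).append(x)
--     result = {}
--     for y in range(min_y, max_y + 1):
--         xs = by_row.get(y)
--         if not xs:
--             result[y] = []
--             continue
--         runs = merge_sorted_xs(sorted(xs))
--         result[y] = [
--             (runs[i][0], runs[i + 1][1]) if i + 1 < len(runs) else runs[i]
--             for i in range(0, len(runs), 2)
--         ]
--     return result
-- ===== Notes on version B (the rewrite author's own statement) =====
-- stated objective: simpler
-- what changed: B drops A's whole third phase (build interior-gap intervals indexed in steps of two, append them, re-sort the combined list of tuples, and run a touch-merge loop) and instead emits the final intervals directly by pairing consecutive boundary runs two at a time ((runs[i][0], runs[i+1][1]), last run alone if odd).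
import Mathlib
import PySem

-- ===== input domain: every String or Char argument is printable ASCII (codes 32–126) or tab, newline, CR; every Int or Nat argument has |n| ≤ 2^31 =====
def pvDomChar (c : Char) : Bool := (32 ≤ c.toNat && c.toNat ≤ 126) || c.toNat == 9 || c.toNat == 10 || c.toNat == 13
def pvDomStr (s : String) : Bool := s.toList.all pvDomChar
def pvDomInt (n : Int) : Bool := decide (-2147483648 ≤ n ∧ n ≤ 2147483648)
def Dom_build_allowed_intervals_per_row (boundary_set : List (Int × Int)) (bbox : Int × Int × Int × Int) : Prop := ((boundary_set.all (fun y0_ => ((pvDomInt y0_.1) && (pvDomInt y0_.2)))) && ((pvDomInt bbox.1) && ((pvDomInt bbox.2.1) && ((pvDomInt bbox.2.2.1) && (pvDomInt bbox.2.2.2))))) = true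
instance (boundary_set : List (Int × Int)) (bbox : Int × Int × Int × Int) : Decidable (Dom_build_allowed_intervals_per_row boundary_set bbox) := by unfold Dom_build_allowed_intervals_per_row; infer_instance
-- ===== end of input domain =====

-- B replaces A's interior-gap + re-sort + touch-merge phase with a single pairing walk over the
-- boundary runs in steps of two (objective: simpler; same asymptotic cost).

-- ===== PORT A =====
-- helper merge_sorted_xs, identical in Source A and Source B
def mergeSortedXs (xs : List Int) : List (Int × Int) :=
  match xs with
  | [] => []
  | x0 :: rest =>
    let st := rest.foldl
      (fun (st : List (Int × Int) × Int × Int) x =>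
        if x = st.2.2 + 1 then (st.1, st.2.1, x)
        else (st.1 ++ [(st.2.1, st.2.2)], x, x))
      (([] : List (Int × Int)), x0, x0)
    st.1 ++ [(st.2.1, st.2.2)]

-- A's per-row body for a nonempty xs: sort, runs, allowed = runs + interior gaps, re-sort, touch-merge
def rowA (xs : List Int) : List (Int × Int) :=
  let xs' := PySem.List.sorted xs (fun v => v)
  let runs := mergeSortedXs xs'
  let allowed := runs.foldl (fun acc r => acc ++ [r]) []
  let allowed2 := (PySem.List.pyRange 0 ((runs.length : Int) - 1) 2).foldl
    (fun acc i =>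
      let left_end := (PySem.List.pyGetD runs i (0, 0)).2
      let right_start := (PySem.List.pyGetD runs (i + 1) (0, 0)).1
      if left_end + 1 ≤ right_start - 1 then acc ++ [(left_end + 1, right_start - 1)] else acc)
    allowed
  if allowed2 = [] then []
  else
    match PySem.List.sorted2 allowed2 (fun p => p.1) (fun p => p.2) with
    | [] => []  -- unreachable (guard above); makes the indexing allowed[0] total
    | a0 :: rest =>
      let st := rest.foldl
        (fun (st : List (Int × Int) × Int × Int) ab =>
          if ab.1 ≤ st.2.2 + 1 then (st.1, st.2.1, max st.2.2 ab.2)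
          else (st.1 ++ [(st.2.1, st.2.2)], ab.1, ab.2))
        (([] : List (Int × Int)), a0.1, a0.2)
      st.1 ++ [(st.2.1, st.2.2)]

def build_allowed_intervals_per_row (boundary_set : List (Int × Int)) (bbox : Int × Int × Int × Int) : List (Int × List (Int × Int)) :=
  let min_y := bbox.2.2.1
  let max_y := bbox.2.2.2
  let boundary_by_row : PySem.Dict Int (List Int) :=
    boundary_set.foldl
      (fun d p =>
        if p.2 < min_y ∨ max_y < p.2 then d
        else d.insert p.2 (d.getD p.2 [] ++ [p.1]))
      ⟨[]⟩
  ((PySem.List.pyRange min_y (max_y + 1) 1).foldl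
    (fun (ibr : PySem.Dict Int (List (Int × Int))) y =>
      match boundary_by_row.get? y with
      | none => ibr.insert y []
      | some xs => if xs = [] then ibr.insert y [] else ibr.insert y (rowA xs))
    ⟨[]⟩).items

-- ===== PORT B =====
-- B's per-row body: sort, runs, then pair consecutive runs two at a time
def rowB (xs : List Int) : List (Int × Int) :=
  let runs := mergeSortedXs (PySem.List.sorted xs (fun v => v))
  (PySem.List.pyRange 0 (runs.length : Int) 2).map
    (fun i =>
      if i + 1 < (runs.length : Int) then
        ((PySem.List.pyGetD runs i (0, 0)).1, (PySem.List.pyGetD runs (i + 1) (0, 0)).2)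
      else PySem.List.pyGetD runs i (0, 0))

def build_allowed_intervals_per_row_alt (boundary_set : List (Int × Int)) (bbox : Int × Int × Int × Int) : List (Int × List (Int × Int)) :=
  let min_y := bbox.2.2.1
  let max_y := bbox.2.2.2
  let by_row : PySem.Dict Int (List Int) :=
    boundary_set.foldl
      (fun d p =>
        if min_y ≤ p.2 ∧ p.2 ≤ max_y then d.insert p.2 (d.getD p.2 [] ++ [p.1])
        else d)
      ⟨[]⟩
  ((PySem.List.pyRange min_y (max_y + 1) 1).foldl
    (fun (res : PySem.Dict Int (List (Int × Int))) y =>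
      match by_row.get? y with
      | none => res.insert y []
      | some xs => if xs = [] then res.insert y [] else res.insert y (rowB xs))
    ⟨[]⟩).items

-- ===== PRECONDITION & SPEC =====
-- Pre_ requires the elements of boundary_set to be pairwise distinct: the Python parameter is a
-- set[tuple[int,int]], which the List models by holding DISTINCT elements; lists with duplicate
-- pairs correspond to no Python input of A.
def Pre_build_allowed_intervals_per_row (boundary_set : List (Int × Int)) (bbox : Int × Int × Int × Int) : Prop :=
  boundary_set.Nodup
instance (boundary_set : List (Int × Int)) (bbox : Int × Int × Int × Int) : Decidable (Pre_build_allowed_intervals_per_row boundary_set bbox) := by unfold Pre_build_allowed_intervals_per_row; infer_instance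
def pvWitness_build_allowed_intervals_per_row : (List (Int × Int)) × (Int × Int × Int × Int) := ([(1, 0), (3, 0), (4, 1)], (1, 4, 0, 1))

def Spec_build_allowed_intervals_per_row (boundary_set : List (Int × Int)) (bbox : Int × Int × Int × Int) (out : List (Int × List (Int × Int))) : Prop := out = build_allowed_intervals_per_row_alt boundary_set bbox
instance (boundary_set : List (Int × Int)) (bbox : Int × Int × Int × Int) (out : List (Int × List (Int × Int))) : Decidable (Spec_build_allowed_intervals_per_row boundary_set bbox out) := by unfold Spec_build_allowed_intervals_per_row; infer_instance

-- ===== CLAIM (what is proved, stated in full; the proofs are below) =====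
def Claim_equal_build_allowed_intervals_per_row : Prop := ∀ (boundary_set : List (Int × Int)) (bbox : Int × Int × Int × Int), Dom_build_allowed_intervals_per_row boundary_set bbox → Pre_build_allowed_intervals_per_row boundary_set bbox → Spec_build_allowed_intervals_per_row boundary_set bbox (build_allowed_intervals_per_row boundary_set bbox)

-- ===== LEMMAS AND PROOFS =====

-- interior gaps between runs[0]–runs[1], runs[2]–runs[3], …, structurally
def gapRec : List (Int × Int) → List (Int × Int)
  | [] => []
  | [_] => []
  | p :: q :: t => (if p.2 + 1 ≤ q.1 - 1 then [(p.2 + 1, q.1 - 1)] else []) ++ gapRec t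

-- the pairing walk, structurally
def pairRec : List (Int × Int) → List (Int × Int)
  | [] => []
  | [p] => [p]
  | p :: q :: t => (p.1, q.2) :: pairRec t

-- runs and gaps interleaved in sorted order
def interRec : List (Int × Int) → List (Int × Int)
  | [] => []
  | [p] => [p]
  | p :: q :: t => p :: (p.2 + 1, q.1 - 1) :: q :: interRec t

-- well-formed run lists: nonempty runs separated by gaps of at least one missing integer
abbrev GoodRuns (l : List (Int × Int)) : Prop :=
  (∀ p ∈ l, p.1 ≤ p.2) ∧ List.IsChain (fun p q => p.2 + 2 ≤ q.1) l

def mtFinish (st : List (Int × Int) × Int × Int) : List (Int × Int) :=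
  st.1 ++ [(st.2.1, st.2.2)]

def mtStep (st : List (Int × Int) × Int × Int) (ab : Int × Int) : List (Int × Int) × Int × Int :=
  if ab.1 ≤ st.2.2 + 1 then (st.1, st.2.1, max st.2.2 ab.2)
  else (st.1 ++ [(st.2.1, st.2.2)], ab.1, ab.2)

lemma pyRange_two_nil (n : Int) (h : n ≤ 0) : PySem.List.pyRange 0 n 2 = [] := by
  unfold PySem.List.pyRange
  simp only [if_neg (by norm_num : ¬(2:Int) = 0)]
  simp
  intro hx; omega

lemma pyRange_two_cons (n : Int) (h : 0 < n) :
    PySem.List.pyRange 0 n 2 = 0 :: (PySem.List.pyRange 0 (n - 2) 2).map (· + 2) := by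
  rw [PySem.List.pyRange_of_pos _ _ (by norm_num)]
  by_cases h2 : n - 2 ≤ 0
  · rw [pyRange_two_nil _ (by omega)]
    have hc : (if (0:Int) < n then ((n - 0 + 2 - 1) / 2).toNat else 0) = 1 := by
      rw [if_pos h]; omega
    rw [hc]
    simp
  · rw [PySem.List.pyRange_of_pos _ _ (by norm_num : (0:Int) < 2)]
    have hc : (if (0:Int) < n then ((n - 0 + 2 - 1) / 2).toNat else 0)
        = (if (0:Int) < n - 2 then ((n - 2 - 0 + 2 - 1) / 2).toNat else 0) + 1 := by
      have h3 : (0:Int) < n - 2 := by omega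
      simp only [if_pos h, if_pos h3]
      omega
    rw [hc, List.range_succ_eq_map]
    simp only [List.map_cons, List.map_map]
    norm_num
    intro a _
    omega

lemma pyGetD_cons_shift (a : Int × Int) (l : List (Int × Int)) (i : Int) (d : Int × Int) (h : 0 ≤ i) :
    PySem.List.pyGetD (a :: l) (i + 1) d = PySem.List.pyGetD l i d := by
  rw [PySem.List.pyGetD_of_nonneg _ _ (by omega), PySem.List.pyGetD_of_nonneg _ _ h]
  have h2 : (i+1).toNat = i.toNat + 1 := by omega
  rw [h2]
  simp [List.getD]

lemma gaps_fold (runs : List (Int × Int)) (acc : List (Int × Int)) :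
    (PySem.List.pyRange 0 ((runs.length : Int) - 1) 2).foldl
      (fun acc i =>
        if (PySem.List.pyGetD runs i (0, 0)).2 + 1 ≤ (PySem.List.pyGetD runs (i + 1) (0, 0)).1 - 1
        then acc ++ [((PySem.List.pyGetD runs i (0, 0)).2 + 1, (PySem.List.pyGetD runs (i + 1) (0, 0)).1 - 1)]
        else acc)
      acc = acc ++ gapRec runs := by
  induction runs using gapRec.induct generalizing acc with
  | case3 p q t ih =>
    have hlen : ((p :: q :: t).length : Int) - 1 = (t.length : Int) + 1 := by
      simp only [List.length_cons]; push_cast; omega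
    rw [hlen, pyRange_two_cons _ (by omega), List.foldl_cons, List.foldl_map]
    have h0 : PySem.List.pyGetD (p :: q :: t) 0 (0, 0) = p := by
      rw [PySem.List.pyGetD_of_nonneg _ _ (by omega)]; rfl
    have h1 : PySem.List.pyGetD (p :: q :: t) (0 + 1) (0, 0) = q := by
      rw [PySem.List.pyGetD_of_nonneg _ _ (by omega)]; rfl
    have hstop : (t.length : Int) + 1 - 2 = (t.length : Int) - 1 := by omega
    rw [hstop]
    rw [PySem.List.foldl_congr_mem _ _
      (fun acc i =>
        if (PySem.List.pyGetD t i (0, 0)).2 + 1 ≤ (PySem.List.pyGetD t (i + 1) (0, 0)).1 - 1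
        then acc ++ [((PySem.List.pyGetD t i (0, 0)).2 + 1, (PySem.List.pyGetD t (i + 1) (0, 0)).1 - 1)]
        else acc) _
      (by
        intro acc i hi
        have hi0 : 0 ≤ i := ((PySem.List.mem_pyRange_iff_of_pos (by norm_num) i).mp hi).1
        have e1 : PySem.List.pyGetD (p :: q :: t) (i + 2) (0, 0) = PySem.List.pyGetD t i (0, 0) := by
          rw [show i + 2 = (i + 1) + 1 by ring, pyGetD_cons_shift _ _ _ _ (by omega),
            pyGetD_cons_shift _ _ _ _ hi0]
        have e2 : PySem.List.pyGetD (p :: q :: t) (i + 2 + 1) (0, 0) = PySem.List.pyGetD t (i + 1) (0, 0) := by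
          rw [show i + 2 + 1 = (i + 1 + 1) + 1 by ring, pyGetD_cons_shift _ _ _ _ (by omega),
            pyGetD_cons_shift _ _ _ _ (by omega)]
        simp only [e1, e2])]
    simp only [h0, h1, gapRec]
    rw [ih]
    split <;> simp
  | case1 =>
    rw [show (([] : List (Int × Int)).length : Int) - 1 = -1 by simp, pyRange_two_nil _ (by omega)]
    simp [gapRec]
  | case2 p =>
    rw [show (([p] : List (Int × Int)).length : Int) - 1 = 0 by simp, pyRange_two_nil _ (by omega)]
    simp [gapRec]

lemma pairs_map (runs : List (Int × Int)) :
    (PySem.List.pyRange 0 (runs.length : Int) 2).map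
      (fun i =>
        if i + 1 < (runs.length : Int) then
          ((PySem.List.pyGetD runs i (0, 0)).1, (PySem.List.pyGetD runs (i + 1) (0, 0)).2)
        else PySem.List.pyGetD runs i (0, 0)) = pairRec runs := by
  induction runs using pairRec.induct with
  | case1 =>
    rw [show (([] : List (Int × Int)).length : Int) = 0 by simp, pyRange_two_nil _ (by omega)]
    simp [pairRec]
  | case2 p =>
    rw [show (([p] : List (Int × Int)).length : Int) = 1 by simp, pyRange_two_cons _ (by omega),
      pyRange_two_nil _ (by omega)]
    have h0 : PySem.List.pyGetD [p] 0 (0, 0) = p := by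
      rw [PySem.List.pyGetD_of_nonneg _ _ (by omega)]; rfl
    simp [pairRec, h0]
  | case3 p q t ih =>
    have hlen : ((p :: q :: t).length : Int) = (t.length : Int) + 2 := by simp only [List.length_cons]; push_cast; omega
    rw [hlen, pyRange_two_cons _ (by omega), List.map_cons, List.map_map]
    have h0 : PySem.List.pyGetD (p :: q :: t) 0 (0, 0) = p := by
      rw [PySem.List.pyGetD_of_nonneg _ _ (by omega)]; rfl
    have h1 : PySem.List.pyGetD (p :: q :: t) (0 + 1) (0, 0) = q := by
      rw [PySem.List.pyGetD_of_nonneg _ _ (by omega)]; rfl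
    have hstop : (t.length : Int) + 2 - 2 = (t.length : Int) := by omega
    rw [hstop]
    simp only [pairRec]
    congr 1
    · rw [if_pos (by omega), h0, h1]
    · rw [← ih]
      apply List.map_congr_left
      intro i hi
      have hi0 : 0 ≤ i := ((PySem.List.mem_pyRange_iff_of_pos (by norm_num) i).mp hi).1
      have hilt : i < (t.length : Int) := ((PySem.List.mem_pyRange_iff_of_pos (by norm_num) i).mp hi).2.1
      have e1 : PySem.List.pyGetD (p :: q :: t) (i + 2) (0, 0) = PySem.List.pyGetD t i (0, 0) := by
        rw [show i + 2 = (i + 1) + 1 by ring, pyGetD_cons_shift _ _ _ _ (by omega),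
          pyGetD_cons_shift _ _ _ _ hi0]
      have e2 : PySem.List.pyGetD (p :: q :: t) (i + 2 + 1) (0, 0) = PySem.List.pyGetD t (i + 1) (0, 0) := by
        rw [show i + 2 + 1 = (i + 1 + 1) + 1 by ring, pyGetD_cons_shift _ _ _ _ (by omega),
          pyGetD_cons_shift _ _ _ _ (by omega)]
      simp only [Function.comp, e1, e2,
        show (i + 2 + 1 < (t.length : Int) + 2) ↔ (i + 1 < (t.length : Int)) from by omega]

def msStep (st : List (Int × Int) × Int × Int) (x : Int) : List (Int × Int) × Int × Int :=
  if x = st.2.2 + 1 then (st.1, st.2.1, x) else (st.1 ++ [(st.2.1, st.2.2)], x, x)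

lemma msAux (rest : List Int) : ∀ (runs : List (Int × Int)) (s e : Int),
    List.IsChain (· < ·) (e :: rest) → GoodRuns (runs ++ [(s, e)]) →
    GoodRuns (mtFinish (rest.foldl msStep (runs, s, e))) := by
  induction rest with
  | nil => intro runs s e _ hg; simpa [mtFinish] using hg
  | cons x t ih =>
    intro runs s e hch hg
    obtain ⟨hex, hcht⟩ := List.isChain_cons_cons.mp hch
    obtain ⟨hm, hc⟩ := hg
    rw [List.foldl_cons]
    by_cases hx : x = e + 1
    · simp only [msStep, if_pos hx]
      apply ih runs s x hcht
      have hse : s ≤ e := hm (s, e) (by simp)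
      constructor
      · intro p hp
        rcases List.mem_append.mp hp with hp | hp
        · exact hm p (List.mem_append_left _ hp)
        · simp at hp; subst hp; simp; omega
      · rcases List.isChain_append.mp hc with ⟨c1, _, hlast⟩
        exact List.isChain_append.mpr ⟨c1, by simp, by simpa using hlast⟩
    · have hx2 : e + 2 ≤ x := by omega
      simp only [msStep, if_neg hx]
      apply ih (runs ++ [(s, e)]) x x hcht
      constructor
      · intro p hp
        rcases List.mem_append.mp hp with hp | hp
        · exact hm p hp
        · simp at hp; subst hp; simp
      · refine List.isChain_append.mpr ⟨hc, by simp, ?_⟩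
        intro a ha b hb
        simp at hb; subst hb
        have hlast2 : (runs ++ [(s, e)]).getLast? = some (s, e) := List.getLast?_concat
        rw [hlast2] at ha
        simp at ha
        subst ha
        simpa using hx2

lemma runs_good (xs : List Int) (h : List.IsChain (· < ·) xs) : GoodRuns (mergeSortedXs xs) := by
  cases xs with
  | nil => exact ⟨by simp [mergeSortedXs], by simp [mergeSortedXs]⟩
  | cons x0 rest =>
    show GoodRuns (mtFinish (rest.foldl msStep ([], x0, x0)))
    exact msAux rest [] x0 x0 h ⟨by simp, by simp⟩

lemma runs_ne_nil (xs : List Int) (h : xs ≠ []) : mergeSortedXs xs ≠ [] := by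
  cases xs with
  | nil => exact absurd rfl h
  | cons x0 rest => simp [mergeSortedXs]

lemma good_tail2 {p q : Int × Int} {t : List (Int × Int)} (h : GoodRuns (p :: q :: t)) : GoodRuns t := by
  refine ⟨fun r hr => h.1 r (by simp [hr]), ?_⟩
  have := h.2.tail.tail
  simpa using this

lemma inter_perm (runs : List (Int × Int)) (h : GoodRuns runs) :
    (runs ++ gapRec runs).Perm (interRec runs) := by
  induction runs using interRec.induct with
  | case1 => simp [gapRec, interRec]
  | case2 p => simp [gapRec, interRec]
  | case3 p q t ih =>
    have hpq : p.2 + 2 ≤ q.1 := (List.isChain_cons_cons.mp h.2).1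
    have hcond : p.2 + 1 ≤ q.1 - 1 := by omega
    simp only [gapRec, interRec, if_pos hcond]
    refine List.Perm.cons p ?_
    exact ((List.Perm.cons q List.perm_middle).trans (List.Perm.swap _ _ _)).trans
      (((ih (good_tail2 h)).cons q).cons _)

lemma inter_chain (runs : List (Int × Int)) (h : GoodRuns runs) :
    List.IsChain (fun p q : Int × Int => p.1 < q.1) (interRec runs) := by
  induction runs using interRec.induct with
  | case1 => simp [interRec]
  | case2 p => simp [interRec]
  | case3 p q t ih =>
    have hpq : p.2 + 2 ≤ q.1 := (List.isChain_cons_cons.mp h.2).1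
    have hp12 : p.1 ≤ p.2 := h.1 p (by simp)
    have hq12 : q.1 ≤ q.2 := h.1 q (by simp)
    simp only [interRec]
    rw [List.isChain_cons_cons, List.isChain_cons_cons]
    refine ⟨by omega, by omega, ?_⟩
    cases t with
    | nil => simp [interRec]
    | cons r t' =>
      have hqr : q.2 + 2 ≤ r.1 := (List.isChain_cons_cons.mp (List.isChain_cons_cons.mp h.2).2).1
      have hrest : ∃ rest, interRec (r :: t') = r :: rest := by
        cases t' with
        | nil => exact ⟨[], rfl⟩
        | cons r2 t'' => exact ⟨_, rfl⟩
      obtain ⟨rest, hre⟩ := hrest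
      rw [hre, List.isChain_cons_cons]
      exact ⟨by omega, hre ▸ ih (good_tail2 h)⟩

lemma insertBy_congr {α : Type} (b1 b2 : α → α → Bool) (x : α) (ys : List α)
    (h : ∀ y ∈ ys, b1 x y = b2 x y) :
    PySem.List.insertBy b1 x ys = PySem.List.insertBy b2 x ys := by
  induction ys with
  | nil => rfl
  | cons y ys ih =>
    simp only [PySem.List.insertBy]
    rw [h y (by simp)]
    split
    · rfl
    · rw [ih (fun z hz => h z (by simp [hz]))]

lemma foldl_insertBy_eq (l : List (Int × Int)) : ∀ (acc : List (Int × Int)),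
    (∀ x ∈ l, ∀ y ∈ acc, x.1 ≠ y.1) → l.Pairwise (fun a b => a.1 ≠ b.1) →
    l.foldl (fun acc x => PySem.List.insertBy
        (fun a b => decide (a.1 < b.1) || (!decide (b.1 < a.1) && decide (a.2 < b.2))) x acc) acc
      = l.foldl (fun acc x => PySem.List.insertBy (fun a b => decide (a.1 < b.1)) x acc) acc := by
  induction l with
  | nil => intro acc _ _; rfl
  | cons x t ih =>
    intro acc hacc hpw
    rw [List.foldl_cons, List.foldl_cons]
    have hib : PySem.List.insertBy
        (fun a b => decide (a.1 < b.1) || (!decide (b.1 < a.1) && decide (a.2 < b.2))) x acc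
        = PySem.List.insertBy (fun a b => decide (a.1 < b.1)) x acc := by
      apply insertBy_congr
      intro y hy
      have hne : x.1 ≠ y.1 := hacc x (by simp) y hy
      rcases lt_trichotomy x.1 y.1 with h1 | h1 | h1
      · simp [h1]
      · exact absurd h1 hne
      · simp [h1, show ¬ x.1 < y.1 by omega]
    rw [hib]
    apply ih
    · intro z hz y hy
      rcases (PySem.List.mem_insertBy _ _ _ _).mp hy with hy | hy
      · subst hy
        exact fun hzx => (List.pairwise_cons.mp hpw).1 z hz hzx.symm
      · exact hacc z (by simp [hz]) y hy
    · exact (List.pairwise_cons.mp hpw).2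

lemma sorted2_eq_sorted_fst (l : List (Int × Int))
    (h : l.Pairwise (fun a b => a.1 ≠ b.1)) :
    PySem.List.sorted2 l (fun p => p.1) (fun p => p.2) = PySem.List.sorted l (fun p => p.1) := by
  simp only [PySem.List.sorted2, PySem.List.sorted, Bool.false_eq_true, if_false]
  exact foldl_insertBy_eq l [] (by simp) h

lemma merge_loop (runs : List (Int × Int)) (h : GoodRuns runs)
    (merged : List (Int × Int)) (s e : Int) (hd : ∀ r ∈ runs.head?, e + 2 ≤ r.1) :
    mtFinish ((interRec runs).foldl mtStep (merged, s, e)) = merged ++ (s, e) :: pairRec runs := by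
  induction runs using pairRec.induct generalizing merged s e with
  | case1 => simp [interRec, pairRec, mtFinish]
  | case2 p =>
    have hp : e + 2 ≤ p.1 := hd p (by simp)
    simp only [interRec, List.foldl_cons, List.foldl_nil]
    have s1 : mtStep (merged, s, e) p = (merged ++ [(s, e)], p.1, p.2) := by
      unfold mtStep
      split
      · rename_i hc; exfalso; simp at hc; omega
      · rfl
    rw [s1]
    simp [mtFinish, pairRec]
  | case3 p q t ih =>
    have hp : e + 2 ≤ p.1 := hd p (by simp)
    have hpq : p.2 + 2 ≤ q.1 := (List.isChain_cons_cons.mp h.2).1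
    have hp12 : p.1 ≤ p.2 := h.1 p (by simp)
    have hq12 : q.1 ≤ q.2 := h.1 q (by simp)
    have hd' : ∀ r ∈ t.head?, q.2 + 2 ≤ r.1 := by
      intro r hr
      cases t with
      | nil => simp at hr
      | cons r0 t' =>
        simp at hr
        subst hr
        have := (List.isChain_cons_cons.mp (List.isChain_cons_cons.mp h.2).2).1
        omega
    simp only [interRec, List.foldl_cons]
    have s1 : mtStep (merged, s, e) p = (merged ++ [(s, e)], p.1, p.2) := by
      unfold mtStep
      split
      · rename_i hc; exfalso; simp at hc; omega
      · rfl
    have s2 : mtStep (merged ++ [(s, e)], p.1, p.2) (p.2 + 1, q.1 - 1)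
        = (merged ++ [(s, e)], p.1, q.1 - 1) := by
      unfold mtStep
      split
      · simp; omega
      · rename_i hc; exfalso; simp at hc
    have s3 : mtStep (merged ++ [(s, e)], p.1, q.1 - 1) q = (merged ++ [(s, e)], p.1, q.2) := by
      unfold mtStep
      split
      · simp; omega
      · rename_i hc; exfalso; simp at hc
    rw [s1, s2, s3, ih (good_tail2 h) (merged ++ [(s, e)]) p.1 q.2 hd']
    simp [pairRec]

lemma core_eq (runs : List (Int × Int)) (hgood : GoodRuns runs) (hrne : runs ≠ []) :
    (if runs ++ gapRec runs = [] then [] else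
      match PySem.List.sorted2 (runs ++ gapRec runs) (fun p => p.1) (fun p => p.2) with
      | [] => []
      | a0 :: rest => mtFinish (rest.foldl mtStep ([], a0.1, a0.2))) = pairRec runs := by
  have hch := inter_chain runs hgood
  have hpwlt : (interRec runs).Pairwise (fun a b : Int × Int => a.1 < b.1) :=
    List.pairwise_map.mp ((List.isChain_map Prod.fst).mpr hch).pairwise
  have hperm2 := inter_perm runs hgood
  have hpwne : (runs ++ gapRec runs).Pairwise (fun a b : Int × Int => a.1 ≠ b.1) :=
    (List.Perm.pairwise_iff (fun {x y} a => (Ne.symm a)) hperm2.symm).mp (hpwlt.imp ne_of_lt)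
  have hane : runs ++ gapRec runs ≠ [] := by
    cases runs with
    | nil => exact absurd rfl hrne
    | cons a b => simp
  have hs2 : PySem.List.sorted2 (runs ++ gapRec runs) (fun p => p.1) (fun p => p.2)
      = interRec runs := by
    rw [sorted2_eq_sorted_fst _ hpwne]
    exact PySem.List.sorted_eq_of_perm_of_pairwise_lt _ _ _ hperm2.symm hpwlt
  rw [if_neg hane, hs2]
  cases runs with
  | nil => exact absurd rfl hrne
  | cons r1 rt =>
    cases rt with
    | nil => simp [interRec, pairRec, mtFinish]
    | cons r2 t =>
      have hpq : r1.2 + 2 ≤ r2.1 := (List.isChain_cons_cons.mp hgood.2).1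
      have hp12 : r1.1 ≤ r1.2 := hgood.1 r1 (by simp)
      have hq12 : r2.1 ≤ r2.2 := hgood.1 r2 (by simp)
      have hd' : ∀ r ∈ t.head?, r2.2 + 2 ≤ r.1 := by
        intro r hr
        cases t with
        | nil => simp at hr
        | cons r0 t' =>
          simp at hr
          subst hr
          have := (List.isChain_cons_cons.mp (List.isChain_cons_cons.mp hgood.2).2).1
          omega
      show mtFinish (((r1.2 + 1, r2.1 - 1) :: r2 :: interRec t).foldl mtStep ([], r1.1, r1.2))
        = pairRec (r1 :: r2 :: t)
      rw [List.foldl_cons, List.foldl_cons]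
      have s2 : mtStep (([] : List (Int × Int)), r1.1, r1.2) (r1.2 + 1, r2.1 - 1)
          = ([], r1.1, r2.1 - 1) := by
        unfold mtStep
        split
        · simp; omega
        · rename_i hc; exfalso; simp at hc
      have s3 : mtStep (([] : List (Int × Int)), r1.1, r2.1 - 1) r2 = ([], r1.1, r2.2) := by
        unfold mtStep
        split
        · simp; omega
        · rename_i hc; exfalso; simp at hc
      rw [s2, s3, merge_loop t (good_tail2 hgood) [] r1.1 r2.2 hd']
      simp [pairRec]

lemma row_eq (xs : List Int) (hne : xs ≠ []) (hnd : xs.Nodup) : rowA xs = rowB xs := by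
  have hperm := PySem.List.sorted_perm xs (fun v => v) false
  have hnd' : (PySem.List.sorted xs (fun v => v)).Nodup := hperm.symm.nodup hnd
  have hle := PySem.List.sorted_pairwise xs (fun v => v)
  have hlt : (PySem.List.sorted xs (fun v => v)).Pairwise (· < ·) :=
    (hle.and hnd').imp (fun hab => lt_of_le_of_ne hab.1 hab.2)
  have hchain : List.IsChain (· < ·) (PySem.List.sorted xs (fun v => v)) :=
    List.isChain_iff_pairwise.mpr hlt
  have hgood := runs_good _ hchain
  have hsne : PySem.List.sorted xs (fun v => v) ≠ [] := by
    intro h0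
    have hlen := hperm.length_eq
    rw [h0] at hlen
    simp at hlen
    exact hne (List.length_eq_zero_iff.mp hlen.symm)
  have hrne := runs_ne_nil _ hsne
  simp only [rowA, rowB]
  rw [PySem.List.foldl_append_singleton_eq_self, List.nil_append, gaps_fold, pairs_map]
  exact core_eq _ hgood hrne

lemma byRow_nodup (l : List (Int × Int)) (min_y max_y : Int) (hl : l.Nodup)
    (d : PySem.Dict Int (List Int))
    (hd : ∀ y x, x ∈ d.getD y [] → (x, y) ∉ l)
    (hnodup : ∀ y, (d.getD y []).Nodup) :
    ∀ y, ((l.foldl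
      (fun d p =>
        if p.2 < min_y ∨ max_y < p.2 then d
        else d.insert p.2 (d.getD p.2 [] ++ [p.1])) d).getD y []).Nodup := by
  induction l generalizing d with
  | nil => intro y; simpa using hnodup y
  | cons p t ih =>
    intro y
    simp only [List.foldl_cons]
    by_cases hc : p.2 < min_y ∨ max_y < p.2
    · rw [if_pos hc]
      exact ih (List.nodup_cons.mp hl).2 d
        (fun y x hx hm => hd y x hx (List.mem_cons_of_mem _ hm)) hnodup y
    · rw [if_neg hc]
      refine ih (List.nodup_cons.mp hl).2 _ ?hd ?hnd y
      case hd =>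
        intro y x hx hm
        by_cases hy : y = p.2
        · subst hy
          rw [show (d.insert p.2 (d.getD p.2 [] ++ [p.1])).getD p.2 []
              = d.getD p.2 [] ++ [p.1] by
              simp [PySem.Dict.getD, PySem.Dict.get?_insert_self]] at hx
          rcases List.mem_append.mp hx with hx | hx
          · exact hd p.2 x hx (by simp [hm])
          · simp at hx
            subst hx
            exact (List.nodup_cons.mp hl).1 (by simpa using hm)
        · rw [show (d.insert p.2 (d.getD p.2 [] ++ [p.1])).getD y []
              = d.getD y [] by
              simp [PySem.Dict.getD, PySem.Dict.get?_insert_of_ne _ _ hy]] at hx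
          exact hd y x hx (by simp [hm])
      case hnd =>
        intro y
        by_cases hy : y = p.2
        · subst hy
          rw [show (d.insert p.2 (d.getD p.2 [] ++ [p.1])).getD p.2 []
              = d.getD p.2 [] ++ [p.1] by
              simp [PySem.Dict.getD, PySem.Dict.get?_insert_self]]
          rw [List.nodup_append]
          refine ⟨hnodup p.2, by simp, ?_⟩
          intro x hx z hz heq
          rw [List.mem_singleton] at hz
          subst hz
          subst heq
          exact hd p.2 p.1 hx (by simp)
        · rw [show (d.insert p.2 (d.getD p.2 [] ++ [p.1])).getD y []
              = d.getD y [] by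
              simp [PySem.Dict.getD, PySem.Dict.get?_insert_of_ne _ _ hy]]
          exact hnodup y

lemma byRow_same (l : List (Int × Int)) (min_y max_y : Int) (d : PySem.Dict Int (List Int)) :
    l.foldl
      (fun d p =>
        if p.2 < min_y ∨ max_y < p.2 then d
        else d.insert p.2 (d.getD p.2 [] ++ [p.1])) d =
    l.foldl
      (fun d p =>
        if min_y ≤ p.2 ∧ p.2 ≤ max_y then d.insert p.2 (d.getD p.2 [] ++ [p.1])
        else d) d := by
  apply PySem.List.foldl_congr_mem
  intro acc p _
  by_cases hc : p.2 < min_y ∨ max_y < p.2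
  · rw [if_pos hc, if_neg (by omega)]
  · rw [if_neg hc, if_pos (by omega)]

-- ===== VERDICT (by name: the statement is the Claim_ definition above) =====
theorem build_allowed_intervals_per_row_spec : Claim_equal_build_allowed_intervals_per_row := by
  intro bs bbox _ hpre
  unfold Spec_build_allowed_intervals_per_row
  unfold build_allowed_intervals_per_row build_allowed_intervals_per_row_alt
  dsimp only
  rw [byRow_same bs bbox.2.2.1 bbox.2.2.2 ⟨[]⟩]
  have hnod := byRow_nodup bs bbox.2.2.1 bbox.2.2.2 hpre ⟨[]⟩
    (by intro y x hx; simp [PySem.Dict.getD, PySem.Dict.get?] at hx)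
    (by intro y; simp [PySem.Dict.getD, PySem.Dict.get?])
  rw [byRow_same bs bbox.2.2.1 bbox.2.2.2 ⟨[]⟩] at hnod
  congr 1
  apply PySem.List.foldl_congr_mem
  intro acc y _
  cases hxs : (bs.foldl
      (fun d p =>
        if bbox.2.2.1 ≤ p.2 ∧ p.2 ≤ bbox.2.2.2 then d.insert p.2 (d.getD p.2 [] ++ [p.1])
        else d) (⟨[]⟩ : PySem.Dict Int (List Int))).get? y with
  | none => rfl
  | some xs =>
    show (if xs = [] then acc.insert y [] else acc.insert y (rowA xs))
        = (if xs = [] then acc.insert y [] else acc.insert y (rowB xs))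
    by_cases hx : xs = []
    · simp [hx]
    · rw [if_neg hx, if_neg hx]
      have hxnd : xs.Nodup := by
        have := hnod y
        rw [PySem.Dict.getD, hxs] at this
        simpa using this
      rw [row_eq xs hx hxnd]
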